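-- pv_equiv track=rewrite | github.com/jonetto/openai-cookbook | tools/scripts/mixpanel/export_trial_events.py | classify_persona
-- ===== SOURCE A (Python) =====
-- ADMIN_EVENTS = {"Generó comprobante de venta", "Generó comprobante de compra"}
--
-- CONTA_EVENTS = {
--     "Generó asiento contable", "Descargó el balance", "Descargó el diario general",
--     "Descargó el estado de resultados", "Agregó una cuenta contable",
-- }
--
-- INV_EVENTS = {"Agregó un ítem", "Generó un ajuste de inventario", "Actualizó precios en pantalla masivo"}
--
-- def classify_persona(events_dict: dict) -> str:
--     """Classify a user's persona from their event counts."""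
--     has_admin = any(events_dict.get(e, 0) > 0 for e in ADMIN_EVENTS)
--     has_conta = any(events_dict.get(e, 0) > 0 for e in CONTA_EVENTS)
--     has_inv = any(events_dict.get(e, 0) > 0 for e in INV_EVENTS)
--
--     if has_admin and has_conta:
--         return "Admin + Contabilidad"
--     if has_admin and has_inv:
--         return "Admin + Inventario"
--     if has_conta and has_inv:
--         return "Contabilidad + Inventario"
--     if has_admin:
--         return "Lleva la administración"
--     if has_conta:
--         return "Lleva la contabilidad"
--     if has_inv:
--         return "Lleva inventario"
--     if events_dict.get("Login", 0) > 0: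
--         return "Login only (not activated)"
--     return "Other"
-- ===== SOURCE B (Python) =====
-- ADMIN_EVENTS = {"Generó comprobante de venta", "Generó comprobante de compra"}
--
-- CONTA_EVENTS = {
--     "Generó asiento contable", "Descargó el balance", "Descargó el diario general",
--     "Descargó el estado de resultados", "Agregó una cuenta contable",
-- }
--
-- INV_EVENTS = {"Agregó un ítem", "Generó un ajuste de inventario", "Actualizó precios en pantalla masivo"}
--
-- _SINGLE = {
--     "Admin": "Lleva la administración",
--     "Contabilidad": "Lleva la contabilidad",
--     "Inventario": "Lleva inventario",
-- }
--
-- def classify_persona(events_dict: dict) -> str: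
--     """Classify a user's persona from their event counts.
--
--     One pass over the dict's items (instead of scanning each event set with
--     dict lookups): every positively-counted event flips its category flag.
--     The label is then built from the flagged category names: the first two
--     in priority order joined with ' + ', a single one mapped to its
--     'Lleva …' phrase, none at all decided by the Login flag.
--     """
--     admin = conta = inv = login = False
--     for event, count in events_dict.items():
--         if count > 0:
--             admin = admin or event in ADMIN_EVENTS
--             conta = conta or event in CONTA_EVENTS
--             inv = inv or event in INV_EVENTS
--             login = login or event == "Login"
--     names = [n for n, f in (("Admin", admin), ("Contabilidad", conta), ("Inventario", inv)) if f]
--     if len(names) >= 2: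
--         return " + ".join(names[:2])
--     if names:
--         return _SINGLE[names[0]]
--     return "Login only (not activated)" if login else "Other"
-- ===== Notes on version B (the rewrite author's own statement) =====
-- stated objective: alternative
-- what changed: Instead of three any() scans over the event sets with a dict lookup each plus a six-branch if-cascade, B makes one pass over the dict's items flipping category/Login flags by set membership, then builds the label from the flagged names (first two joined with ' + ', a single one mapped to its 'Lleva ...' phrase, none decided by the Login flag).
import Mathlib
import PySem

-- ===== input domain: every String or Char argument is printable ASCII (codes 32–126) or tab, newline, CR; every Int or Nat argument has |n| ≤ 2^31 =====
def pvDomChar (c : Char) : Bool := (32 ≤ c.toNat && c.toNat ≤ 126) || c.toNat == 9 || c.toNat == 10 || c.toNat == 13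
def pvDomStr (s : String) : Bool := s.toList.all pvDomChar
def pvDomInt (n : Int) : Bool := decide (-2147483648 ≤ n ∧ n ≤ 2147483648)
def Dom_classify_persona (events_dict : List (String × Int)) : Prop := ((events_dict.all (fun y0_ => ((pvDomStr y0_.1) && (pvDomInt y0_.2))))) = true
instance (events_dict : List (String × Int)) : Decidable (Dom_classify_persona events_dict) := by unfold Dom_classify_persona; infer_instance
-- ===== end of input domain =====

-- B replaces A's three any() scans over the event sets + if-cascade by a single pass over
-- the dict items accumulating flags, building the label from the flagged category names
-- (objective: alternative decomposition, same cost).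

-- ===== PORT A =====
def ADMIN_EVENTS : List String := ["Generó comprobante de venta", "Generó comprobante de compra"]
def CONTA_EVENTS : List String :=
  ["Generó asiento contable", "Descargó el balance", "Descargó el diario general",
   "Descargó el estado de resultados", "Agregó una cuenta contable"]
def INV_EVENTS : List String := ["Agregó un ítem", "Generó un ajuste de inventario", "Actualizó precios en pantalla masivo"]

-- any(events_dict.get(e, 0) > 0 for e in S)  (set iteration order is irrelevant to any())
def pvAnyPos (events_dict : List (String × Int)) (S : List String) : Bool :=
  S.any (fun e => (PySem.Dict.mk events_dict).getD e 0 > 0)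

def classify_persona (events_dict : List (String × Int)) : String :=
  let has_admin := pvAnyPos events_dict ADMIN_EVENTS
  let has_conta := pvAnyPos events_dict CONTA_EVENTS
  let has_inv := pvAnyPos events_dict INV_EVENTS
  if has_admin && has_conta then "Admin + Contabilidad"
  else if has_admin && has_inv then "Admin + Inventario"
  else if has_conta && has_inv then "Contabilidad + Inventario"
  else if has_admin then "Lleva la administración"
  else if has_conta then "Lleva la contabilidad"
  else if has_inv then "Lleva inventario"
  else if (PySem.Dict.mk events_dict).getD "Login" 0 > 0 then "Login only (not activated)"
  else "Other"

-- ===== PORT B =====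
def SINGLE_TABLE : PySem.Dict String String :=
  PySem.Dict.mk
    [("Admin", "Lleva la administración"),
     ("Contabilidad", "Lleva la contabilidad"),
     ("Inventario", "Lleva inventario")]

-- the for-loop over events_dict.items() accumulating (admin, conta, inv, login)
def pvFlags (events_dict : List (String × Int)) : Bool × Bool × Bool × Bool :=
  events_dict.foldl
    (fun st p =>
      if p.2 > 0 then
        (st.1 || ADMIN_EVENTS.contains p.1,
         st.2.1 || CONTA_EVENTS.contains p.1,
         st.2.2.1 || INV_EVENTS.contains p.1,
         st.2.2.2 || (p.1 == "Login"))
      else st)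
    (false, false, false, false)

def classify_persona_alt (events_dict : List (String × Int)) : String :=
  let st := pvFlags events_dict
  let names :=
    (([("Admin", st.1), ("Contabilidad", st.2.1), ("Inventario", st.2.2.1)].filter (·.2)).map (·.1))
  if names.length ≥ 2 then PySem.Str.join " + " (names.take 2)
  else match names with
    | [n] =>
        -- Python's _SINGLE[names[0]]; the key is always present, KeyError unreachable
        (SINGLE_TABLE.get? n).getD ""
    | _ => if (pvFlags events_dict).2.2.2 then "Login only (not activated)" else "Other"

-- ===== PRECONDITION & SPEC =====
-- Pre_ excludes association lists with duplicate keys: such a list does not represent a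
-- Python dict (the function's declared argument type), and on it A's first-match lookup vs
-- B's full scan are both accidental readings. Every real dict input satisfies Pre_.
def Pre_classify_persona (events_dict : List (String × Int)) : Prop :=
  (events_dict.map Prod.fst).Nodup
instance (events_dict : List (String × Int)) : Decidable (Pre_classify_persona events_dict) := by
  unfold Pre_classify_persona; infer_instance

def pvWitness_classify_persona : (List (String × Int)) := [("Login", 1), ("Other event", 0)]

def Spec_classify_persona (events_dict : List (String × Int)) (out : String) : Prop := out = classify_persona_alt events_dict
instance (events_dict : List (String × Int)) (out : String) : Decidable (Spec_classify_persona events_dict out) := by unfold Spec_classify_persona; infer_instance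

-- ===== CLAIM (what is proved, stated in full; the proofs are below) =====
def Claim_equal_classify_persona : Prop := ∀ (events_dict : List (String × Int)), Dom_classify_persona events_dict → Pre_classify_persona events_dict → Spec_classify_persona events_dict (classify_persona events_dict)

-- ===== LEMMAS AND PROOFS =====

-- the flag the fold accumulates, as a list predicate
def pvHit (events_dict : List (String × Int)) (f : String → Bool) : Bool :=
  events_dict.any (fun p => decide (0 < p.2) && f p.1)

theorem pvFlags_aux (l : List (String × Int)) :
    ∀ a c i lg : Bool,
      l.foldl
        (fun st p =>
          if p.2 > 0 then
            (st.1 || ADMIN_EVENTS.contains p.1,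
             st.2.1 || CONTA_EVENTS.contains p.1,
             st.2.2.1 || INV_EVENTS.contains p.1,
             st.2.2.2 || (p.1 == "Login"))
          else st)
        (a, c, i, lg) =
      (a || pvHit l (ADMIN_EVENTS.contains ·),
       c || pvHit l (CONTA_EVENTS.contains ·),
       i || pvHit l (INV_EVENTS.contains ·),
       lg || pvHit l (· == "Login")) := by
  induction l with
  | nil => intro a c i lg; simp [pvHit]
  | cons p t ih =>
      intro a c i lg
      by_cases h : p.2 > 0
      · simp only [List.foldl_cons, if_pos h, ih]
        simp [pvHit, h, Bool.or_assoc]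
      · simp only [List.foldl_cons, if_neg h, ih]
        simp [pvHit, h]

theorem pvFlags_eq (events_dict : List (String × Int)) :
    pvFlags events_dict =
      (pvHit events_dict (ADMIN_EVENTS.contains ·),
       pvHit events_dict (CONTA_EVENTS.contains ·),
       pvHit events_dict (INV_EVENTS.contains ·),
       pvHit events_dict (· == "Login")) := by
  have h := pvFlags_aux events_dict false false false false
  simpa [pvFlags] using h

theorem getD_pos_iff (events_dict : List (String × Int)) (e : String)
    (h : (events_dict.map Prod.fst).Nodup) :
    (0 < (PySem.Dict.mk events_dict).getD e 0) ↔ ∃ v, (e, v) ∈ events_dict ∧ 0 < v := by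
  induction events_dict with
  | nil => simp [PySem.Dict.getD_eq_get?_getD, PySem.Dict.get?]
  | cons p t ih =>
      have hnd : (t.map Prod.fst).Nodup := (List.nodup_cons.mp h).2
      have hnm : p.1 ∉ t.map Prod.fst := (List.nodup_cons.mp h).1
      rw [PySem.Dict.getD_eq_get?_getD, PySem.Dict.get?_mk_cons]
      by_cases he : p.1 = e
      · subst he
        simp only [beq_self_eq_true, if_pos, Option.getD_some]
        constructor
        · intro hv; exact ⟨p.2, List.mem_cons_self .., hv⟩
        · rintro ⟨v, hm, hv⟩
          rcases List.mem_cons.mp hm with h1 | h1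
          · have hv2 : v = p.2 := congrArg Prod.snd h1
            rwa [hv2] at hv
          · exact absurd (List.mem_map_of_mem (f := Prod.fst) h1) hnm
      · rw [if_neg (by simpa using fun hh => he hh)]
        rw [← PySem.Dict.getD_eq_get?_getD]
        rw [ih hnd]
        constructor
        · rintro ⟨v, hm, hv⟩; exact ⟨v, List.mem_cons_of_mem _ hm, hv⟩
        · rintro ⟨v, hm, hv⟩
          rcases List.mem_cons.mp hm with h1 | h1
          · exact absurd (Prod.ext_iff.mp h1).1.symm he
          · exact ⟨v, h1, hv⟩

theorem pvAnyPos_eq_pvHit (events_dict : List (String × Int)) (S : List String)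
    (h : (events_dict.map Prod.fst).Nodup) :
    pvAnyPos events_dict S = pvHit events_dict (S.contains ·) := by
  rw [Bool.eq_iff_iff]
  simp only [pvAnyPos, pvHit, List.any_eq_true, decide_eq_true_eq, Bool.and_eq_true,
    List.contains_eq_mem, gt_iff_lt]
  constructor
  · rintro ⟨e, heS, hpos⟩
    rcases (getD_pos_iff events_dict e h).mp hpos with ⟨v, hm, hv⟩
    exact ⟨(e, v), hm, by simpa using hv, by simpa using heS⟩
  · rintro ⟨p, hp, hv, hS⟩
    exact ⟨p.1, by simpa using hS,
      (getD_pos_iff events_dict p.1 h).mpr ⟨p.2, hp, by simpa using hv⟩⟩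

-- ===== VERDICT (by name: the statement is the Claim_ definition above) =====
theorem login_iff (l : List (String × Int)) (h : (l.map Prod.fst).Nodup) :
    ((PySem.Dict.mk l).getD "Login" 0 > 0) ↔ (pvHit l (· == "Login") = true) := by
  rw [gt_iff_lt, getD_pos_iff l "Login" h]
  simp only [pvHit, List.any_eq_true, Bool.and_eq_true, decide_eq_true_eq, beq_iff_eq]
  constructor
  · rintro ⟨v, hm, hv⟩; exact ⟨("Login", v), hm, hv, rfl⟩
  · rintro ⟨⟨k, v⟩, hp, hv, hk⟩
    exact ⟨v, by simpa [show k = "Login" from hk] using hp, hv⟩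

theorem classify_persona_spec : Claim_equal_classify_persona := by
  intro l _ hpre
  unfold Spec_classify_persona classify_persona classify_persona_alt
  rw [pvAnyPos_eq_pvHit l ADMIN_EVENTS hpre, pvAnyPos_eq_pvHit l CONTA_EVENTS hpre,
    pvAnyPos_eq_pvHit l INV_EVENTS hpre, pvFlags_eq]
  have hl := login_iff l hpre
  cases h1 : pvHit l (ADMIN_EVENTS.contains ·) <;>
    cases h2 : pvHit l (CONTA_EVENTS.contains ·) <;>
      cases h3 : pvHit l (INV_EVENTS.contains ·) <;>
        cases h4 : pvHit l (· == "Login") <;>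
          simp_all [SINGLE_TABLE, PySem.Dict.get?, PySem.Str.join]
  all_goals decide
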